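-- pv_equiv track=rewrite | github.com/kartikeyshelot/DBOPS_PCloud | DBOPS_PCloud/backend/services/analytics.py | get_business_priority
-- ===== SOURCE A (Python) =====
-- def get_business_priority(env: str, crit: str) -> str:
--     """Assign business priority. Unknown environment = Production."""
--     e, c = str(env).upper(), str(crit).upper()
--     # Production (explicit or Unknown — unknown means production)
--     if ("PRODUCTION" in e and "NON" not in e) or "UNKNOWN" in e or e == "":
--         if "CRITICAL" in c or "HIGH" in c:
--             return "URGENT"
--         return "HIGH" if "STANDARD" in c else "LOW"
--     # Non-production (explicitly tagged)
--     if any(x in e for x in ["NON-PRODUCTION", "NON PRODUCTION", "DEV", "UAT"]):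
--         if "CRITICAL" in c or "HIGH" in c:
--             return "MEDIUM"
--         return "LOW"
--     return "LOW"
-- ===== SOURCE B (Python) =====
-- def get_business_priority(env: str, crit: str) -> str:
--     """Classify env and crit independently, then look the pair up in a table."""
--     e, c = str(env).upper(), str(crit).upper()
--     if ("PRODUCTION" in e and "NON" not in e) or "UNKNOWN" in e or e == "":
--         env_type = "prod"
--     elif any(x in e for x in ["NON-PRODUCTION", "NON PRODUCTION", "DEV", "UAT"]):
--         env_type = "nonprod"
--     else:
--         env_type = "other"
--     if "CRITICAL" in c or "HIGH" in c:
--         crit_level = "high"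
--     elif "STANDARD" in c:
--         crit_level = "standard"
--     else:
--         crit_level = "low"
--     table = {
--         ("prod", "high"): "URGENT",
--         ("prod", "standard"): "HIGH",
--         ("prod", "low"): "LOW",
--         ("nonprod", "high"): "MEDIUM",
--         ("nonprod", "standard"): "LOW",
--         ("nonprod", "low"): "LOW",
--     }
--     return table.get((env_type, crit_level), "LOW")
-- ===== Notes on version B (the rewrite author's own statement) =====
-- stated objective: simpler
-- what changed: Replaces the nested-if scan with two independent classifications (env_type and crit_level) followed by a lookup of the pair in an explicit priority table.
import Mathlib
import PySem

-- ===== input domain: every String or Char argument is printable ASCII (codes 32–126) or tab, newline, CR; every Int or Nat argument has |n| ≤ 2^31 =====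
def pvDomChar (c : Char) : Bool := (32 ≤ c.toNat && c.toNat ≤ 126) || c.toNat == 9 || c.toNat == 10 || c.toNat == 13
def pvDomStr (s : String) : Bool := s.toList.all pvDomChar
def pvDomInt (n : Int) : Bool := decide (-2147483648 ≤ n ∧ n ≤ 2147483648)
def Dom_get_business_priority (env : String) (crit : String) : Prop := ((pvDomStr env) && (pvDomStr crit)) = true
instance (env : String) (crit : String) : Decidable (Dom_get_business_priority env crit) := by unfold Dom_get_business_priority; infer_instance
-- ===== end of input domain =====

-- B re-organises A's nested-if scan into two independent classifications (env_type, crit_level)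
-- and a lookup in an explicit table; objective: simpler/clearer decomposition, same cost.

-- ===== PORT A =====
def get_business_priority (env : String) (crit : String) : String :=
  let e := PySem.Str.upper env
  let c := PySem.Str.upper crit
  if (PySem.Str.isIn "PRODUCTION" e && !(PySem.Str.isIn "NON" e))
      || PySem.Str.isIn "UNKNOWN" e || e == "" then
    if PySem.Str.isIn "CRITICAL" c || PySem.Str.isIn "HIGH" c then "URGENT"
    else if PySem.Str.isIn "STANDARD" c then "HIGH" else "LOW"
  else if ["NON-PRODUCTION", "NON PRODUCTION", "DEV", "UAT"].any
      (fun x => PySem.Str.isIn x e) then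
    if PySem.Str.isIn "CRITICAL" c || PySem.Str.isIn "HIGH" c then "MEDIUM" else "LOW"
  else "LOW"

-- ===== PORT B =====
def get_business_priority_alt (env : String) (crit : String) : String :=
  let e := PySem.Str.upper env
  let c := PySem.Str.upper crit
  let env_type : String :=
    if (PySem.Str.isIn "PRODUCTION" e && !(PySem.Str.isIn "NON" e))
        || PySem.Str.isIn "UNKNOWN" e || e == "" then "prod"
    else if ["NON-PRODUCTION", "NON PRODUCTION", "DEV", "UAT"].any
        (fun x => PySem.Str.isIn x e) then "nonprod"
    else "other"
  let crit_level : String :=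
    if PySem.Str.isIn "CRITICAL" c || PySem.Str.isIn "HIGH" c then "high"
    else if PySem.Str.isIn "STANDARD" c then "standard"
    else "low"
  let table : PySem.Dict (String × String) String :=
    PySem.Dict.ofList
      [ (("prod", "high"), "URGENT"), (("prod", "standard"), "HIGH"),
        (("prod", "low"), "LOW"), (("nonprod", "high"), "MEDIUM"),
        (("nonprod", "standard"), "LOW"), (("nonprod", "low"), "LOW") ]
  table.getD (env_type, crit_level) "LOW"

-- ===== PRECONDITION & SPEC =====
def Spec_get_business_priority (env : String) (crit : String) (out : String) : Prop := out = get_business_priority_alt env crit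
instance (env : String) (crit : String) (out : String) : Decidable (Spec_get_business_priority env crit out) := by unfold Spec_get_business_priority; infer_instance

-- ===== CLAIM (what is proved, stated in full; the proofs are below) =====
def Claim_equal_get_business_priority : Prop := ∀ (env : String) (crit : String), Dom_get_business_priority env crit → Spec_get_business_priority env crit (get_business_priority env crit)

-- ===== LEMMAS AND PROOFS =====

-- ===== VERDICT (by name: the statement is the Claim_ definition above) =====
theorem get_business_priority_spec : Claim_equal_get_business_priority := by
  intro env crit _
  unfold Spec_get_business_priority get_business_priority get_business_priority_alt
  cases h1 : (PySem.Str.isIn "PRODUCTION" (PySem.Str.upper env)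
        && !(PySem.Str.isIn "NON" (PySem.Str.upper env)))
      || PySem.Str.isIn "UNKNOWN" (PySem.Str.upper env) || PySem.Str.upper env == "" <;>
  cases h2 : ["NON-PRODUCTION", "NON PRODUCTION", "DEV", "UAT"].any
      (fun x => PySem.Str.isIn x (PySem.Str.upper env)) <;>
  cases h3 : PySem.Str.isIn "CRITICAL" (PySem.Str.upper crit)
      || PySem.Str.isIn "HIGH" (PySem.Str.upper crit) <;>
  cases h4 : PySem.Str.isIn "STANDARD" (PySem.Str.upper crit) <;>
    simp only [h1, h2, h3, h4, Bool.false_eq_true, Bool.true_eq_false] <;> rfl
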